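-- pv_equiv track=rewrite | github.com/buddy-compiler/buddy-mlir | tests/Python/AtenOpsCoverage/collect_numeric_coverage.py | _pick_best_overload
-- ===== SOURCE A (Python) =====
-- from typing import Any, Dict, Iterable, List, Tuple
--
-- def _pick_best_overload(overloads: Iterable[str]) -> str:
--     priority = (
--         "default",
--         "Tensor",
--         "self",
--         "Tensor_out",
--         "out",
--     )
--     overloads = list(overloads)
--     for want in priority:
--         if want in overloads:
--             return want
--     return overloads[0] if overloads else ""
-- ===== SOURCE B (Python) =====
-- def _pick_best_overload(overloads):
--     priority = (
--         "default",
--         "Tensor",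
--         "self",
--         "Tensor_out",
--         "out",
--     )
--     overloads = list(overloads)
--     if not overloads:
--         return ""
--     rank = {name: i for i, name in enumerate(priority)}
--     return min(overloads, key=lambda o: rank.get(o, len(priority)))
-- ===== Notes on version B (the rewrite author's own statement) =====
-- stated objective: idiomatic
-- what changed: Instead of scanning the priority tuple and testing membership in the overloads list for each entry, B builds a rank dict once and takes min(overloads, key=rank) in a single pass over the overloads, with an explicit empty-list guard.
import Mathlib
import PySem

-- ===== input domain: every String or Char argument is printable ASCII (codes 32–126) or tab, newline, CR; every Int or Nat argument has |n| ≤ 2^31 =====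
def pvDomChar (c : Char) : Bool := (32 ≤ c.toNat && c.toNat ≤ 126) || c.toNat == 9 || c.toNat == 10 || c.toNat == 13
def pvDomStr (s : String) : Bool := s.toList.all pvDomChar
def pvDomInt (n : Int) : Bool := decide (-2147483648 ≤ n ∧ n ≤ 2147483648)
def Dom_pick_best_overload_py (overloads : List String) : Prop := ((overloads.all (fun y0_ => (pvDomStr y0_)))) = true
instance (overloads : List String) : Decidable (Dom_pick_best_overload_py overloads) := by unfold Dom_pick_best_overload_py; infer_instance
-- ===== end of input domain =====

-- B replaces A's scan over the priority tuple (one membership test per entry) by a rank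
-- dictionary built once and a single min-by-rank pass over the overloads list (idiomatic).

-- ===== PORT A =====
-- the `for want in priority: if want in overloads: return want` loop
def pvPickLoop (overloads : List String) : List String → Option String
  | [] => none
  | w :: ws => if overloads.contains w then some w else pvPickLoop overloads ws

def pick_best_overload_py (overloads : List String) : String :=
  match pvPickLoop overloads ["default", "Tensor", "self", "Tensor_out", "out"] with
  | some w => w
  | none =>
    match overloads with
    | [] => ""
    | x :: _ => x

-- ===== PORT B =====
def pick_best_overload_py_alt (overloads : List String) : String :=
  let priority : List String := ["default", "Tensor", "self", "Tensor_out", "out"]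
  match overloads with
  | [] => ""
  | _ :: _ =>
    let rank : PySem.Dict String Int :=
      (PySem.List.enumerate priority).foldl (fun d p => d.insert p.2 p.1) (PySem.Dict.mk [])
    match PySem.List.min? overloads (fun o => rank.getD o (Int.ofNat priority.length)) with
    | some m => m
    | none => ""  -- unreachable: overloads is nonempty

-- ===== PRECONDITION & SPEC =====
def Spec_pick_best_overload_py (overloads : List String) (out : String) : Prop := out = pick_best_overload_py_alt overloads
instance (overloads : List String) (out : String) : Decidable (Spec_pick_best_overload_py overloads out) := by unfold Spec_pick_best_overload_py; infer_instance

-- ===== CLAIM (what is proved, stated in full; the proofs are below) =====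
def Claim_equal_pick_best_overload_py : Prop := ∀ (overloads : List String), Dom_pick_best_overload_py overloads → Spec_pick_best_overload_py overloads (pick_best_overload_py overloads)

-- ===== LEMMAS AND PROOFS =====

-- B's key function, as a name for the proofs
def pvK (o : String) : Int :=
  ((PySem.List.enumerate ["default", "Tensor", "self", "Tensor_out", "out"]).foldl
      (fun d p => d.insert p.2 p.1) (PySem.Dict.mk [])).getD o
    (Int.ofNat (["default", "Tensor", "self", "Tensor_out", "out"] : List String).length)

lemma pvAlt_eq (overloads : List String) :
    pick_best_overload_py_alt overloads =
      match overloads with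
      | [] => ""
      | _ :: _ =>
        match PySem.List.min? overloads pvK with
        | some m => m
        | none => "" := by
  cases overloads <;> rfl

lemma pvK_spec (y : String) :
    pvK y = if y = "default" then 0 else if y = "Tensor" then 1 else if y = "self" then 2
      else if y = "Tensor_out" then 3 else if y = "out" then 4 else 5 := by
  show (PySem.Dict.mk [("default", (0:Int)), ("Tensor", 1), ("self", 2), ("Tensor_out", 3), ("out", 4)]).getD y 5 = _
  by_cases h1 : y = "default"; · subst h1; decide
  by_cases h2 : y = "Tensor"; · subst h2; decide
  by_cases h3 : y = "self"; · subst h3; decide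
  by_cases h4 : y = "Tensor_out"; · subst h4; decide
  by_cases h5 : y = "out"; · subst h5; decide
  have e1 : ("default" == y) = false := beq_eq_false_iff_ne.mpr (fun e => h1 e.symm)
  have e2 : ("Tensor" == y) = false := beq_eq_false_iff_ne.mpr (fun e => h2 e.symm)
  have e3 : ("self" == y) = false := beq_eq_false_iff_ne.mpr (fun e => h3 e.symm)
  have e4 : ("Tensor_out" == y) = false := beq_eq_false_iff_ne.mpr (fun e => h4 e.symm)
  have e5 : ("out" == y) = false := beq_eq_false_iff_ne.mpr (fun e => h5 e.symm)
  simp [PySem.Dict.getD, PySem.Dict.get?, List.find?, e1, e2, e3, e4, e5, h1, h2, h3, h4, h5]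

lemma pvMin?_unique {ov : List String} {k : String → Int} {w : String} (hw : w ∈ ov)
    (hle : ∀ y ∈ ov, k w ≤ k y) (huniq : ∀ y ∈ ov, k y = k w → y = w) :
    PySem.List.min? ov k = some w := by
  cases hm : PySem.List.min? ov k with
  | none =>
    rw [PySem.List.min?_eq_none_iff] at hm
    subst hm; cases hw
  | some m =>
    have hmem := PySem.List.min?_mem hm
    have hmin := PySem.List.min?_isMin hm
    have : k m = k w := le_antisymm (hmin w hw) (hle m hmem)
    rw [huniq m hmem this]

lemma pvMin?_stay {k : String → Int} : ∀ (t : List String) (m : String),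
    (∀ y ∈ t, ¬ k y < k m) → PySem.List.min? (m :: t) k = some m := by
  intro t
  induction t with
  | nil => intro m _; rfl
  | cons a t ih =>
    intro m h
    have step : PySem.List.min? (m :: a :: t) k = PySem.List.min? (m :: t) k := by
      simp only [PySem.List.min?, List.foldl]
      rw [if_neg (h a (by simp))]
    rw [step]
    exact ih m (fun y hy => h y (by simp [hy]))

lemma pvMin?_head {k : String → Int} (x : String) (t : List String)
    (h : ∀ y ∈ x :: t, k y = 5) :
    PySem.List.min? (x :: t) k = some x :=
  pvMin?_stay t x (fun y hy => by rw [h y (by simp [hy]), h x (by simp)]; omega)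

-- the winner of A's loop is also B's unique min
lemma pvCase {ov : List String} {w : String} (hw : w ∈ ov) (r : Int) (hkw : pvK w = r)
    (hge : ∀ y ∈ ov, r ≤ pvK y) (hun : ∀ y ∈ ov, pvK y = r → y = w) :
    pick_best_overload_py_alt ov = w := by
  rw [pvAlt_eq]
  cases ov with
  | nil => cases hw
  | cons x t =>
    rw [pvMin?_unique hw (fun y hy => hkw ▸ hge y hy) (fun y hy h => hun y hy (hkw ▸ h))]

-- ===== VERDICT (by name: the statement is the Claim_ definition above) =====
theorem pick_best_overload_py_spec : Claim_equal_pick_best_overload_py := by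
  intro ov _
  show pick_best_overload_py ov = pick_best_overload_py_alt ov
  unfold pick_best_overload_py
  simp only [pvPickLoop]
  by_cases h0 : ov.contains "default"
  · rw [if_pos h0]
    show ("default" : String) = pick_best_overload_py_alt ov
    refine (pvCase (by simpa using h0) 0 (by decide) ?_ ?_).symm
    · intro y hy; rw [pvK_spec y]; split_ifs <;> omega
    · intro y hy hk; rw [pvK_spec y] at hk
      split_ifs at hk with e1 e2 e3 e4 e5 <;> first | assumption | omega
  have hd : "default" ∉ ov := by simpa using h0
  rw [if_neg h0]
  by_cases h1 : ov.contains "Tensor"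
  · rw [if_pos h1]
    show ("Tensor" : String) = pick_best_overload_py_alt ov
    refine (pvCase (by simpa using h1) 1 (by decide) ?_ ?_).symm
    · intro y hy; rw [pvK_spec y]; split_ifs with e1 e2 e3 e4 e5
      · exact absurd (e1 ▸ hy) hd
      all_goals omega
    · intro y hy hk; rw [pvK_spec y] at hk
      split_ifs at hk with e1 e2 e3 e4 e5 <;> first | assumption | omega
  have hT : "Tensor" ∉ ov := by simpa using h1
  rw [if_neg h1]
  by_cases h2 : ov.contains "self"
  · rw [if_pos h2]
    show ("self" : String) = pick_best_overload_py_alt ov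
    refine (pvCase (by simpa using h2) 2 (by decide) ?_ ?_).symm
    · intro y hy; rw [pvK_spec y]; split_ifs with e1 e2 e3 e4 e5
      · exact absurd (e1 ▸ hy) hd
      · exact absurd (e2 ▸ hy) hT
      all_goals omega
    · intro y hy hk; rw [pvK_spec y] at hk
      split_ifs at hk with e1 e2 e3 e4 e5 <;> first | assumption | omega
  have hs : "self" ∉ ov := by simpa using h2
  rw [if_neg h2]
  by_cases h3 : ov.contains "Tensor_out"
  · rw [if_pos h3]
    show ("Tensor_out" : String) = pick_best_overload_py_alt ov
    refine (pvCase (by simpa using h3) 3 (by decide) ?_ ?_).symm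
    · intro y hy; rw [pvK_spec y]; split_ifs with e1 e2 e3 e4 e5
      · exact absurd (e1 ▸ hy) hd
      · exact absurd (e2 ▸ hy) hT
      · exact absurd (e3 ▸ hy) hs
      all_goals omega
    · intro y hy hk; rw [pvK_spec y] at hk
      split_ifs at hk with e1 e2 e3 e4 e5 <;> first | assumption | omega
  have hto : "Tensor_out" ∉ ov := by simpa using h3
  rw [if_neg h3]
  by_cases h4 : ov.contains "out"
  · rw [if_pos h4]
    show ("out" : String) = pick_best_overload_py_alt ov
    refine (pvCase (by simpa using h4) 4 (by decide) ?_ ?_).symm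
    · intro y hy; rw [pvK_spec y]; split_ifs with e1 e2 e3 e4 e5
      · exact absurd (e1 ▸ hy) hd
      · exact absurd (e2 ▸ hy) hT
      · exact absurd (e3 ▸ hy) hs
      · exact absurd (e4 ▸ hy) hto
      all_goals omega
    · intro y hy hk; rw [pvK_spec y] at hk
      split_ifs at hk with e1 e2 e3 e4 e5 <;> first | assumption | omega
  have ho : "out" ∉ ov := by simpa using h4
  rw [if_neg h4]
  cases ov with
  | nil => rfl
  | cons x t =>
    rw [pvAlt_eq]
    have hall : ∀ y ∈ x :: t, pvK y = 5 := by
      intro y hy; rw [pvK_spec y]; split_ifs with e1 e2 e3 e4 e5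
      · exact absurd (e1 ▸ hy) hd
      · exact absurd (e2 ▸ hy) hT
      · exact absurd (e3 ▸ hy) hs
      · exact absurd (e4 ▸ hy) hto
      · exact absurd (e5 ▸ hy) ho
      · rfl
    rw [pvMin?_head x t hall]
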